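-- pv_equiv track=rewrite | github.com/Shushuda/new_horizons | app/bin/find_bugs.py | clean_months
-- ===== SOURCE A (Python) =====
-- def clean_months(seasonality):
--     if len(seasonality) == 12:
--         return 'All year'
--     else:
--         ranges = []
--         start = 0
--         for i in range(0, len(seasonality)):
--             if i == len(seasonality)-1 or seasonality[i+1] != nxt(seasonality[i]):
--                 # add months to output list
--                 ranges.append((seasonality[start], seasonality[i]))
--                 start = i+1
--         if ranges[0][0] == 'Jan' and ranges[-1][1] == 'Dec':
--             ranges[0] = (ranges[-1][0], ranges[0][1])
--             ranges.pop()
--         months = [range_str(rng) for rng in ranges]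
--         return ', '.join(months)
--
-- def range_str(rng):
--     if rng[0] == rng[1]:
--         return rng[0]
--     return '{} - {}'.format(rng[0], rng[1])
--
-- def nxt(month):
--     mos = list(load_dict().keys())
--     return mos[(mos.index(month)+1)%len(mos)]
--
-- def load_dict():
--     return {
--         'Jan' : 1,
--         'Feb' : 2,
--         'Mar' : 3,
--         'Apr' : 4,
--         'May' : 5,
--         'June' : 6,
--         'July' : 7,
--         'Aug' : 8,
--         'Sept' : 9,
--         'Oct' : 10,
--         'Nov' : 11,
--         'Dec' : 12
--     }
-- ===== SOURCE B (Python) =====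
-- _MONTHS = ['Jan', 'Feb', 'Mar', 'Apr', 'May', 'June', 'July', 'Aug', 'Sept', 'Oct', 'Nov', 'Dec']
--
--
-- def _key(pos, month):
--     # A run of consecutive months (with Dec wrapping to Jan) has one constant key.
--     return (_MONTHS.index(month) - pos) % 12
--
--
-- def _runs(pairs):
--     # group adjacent (key, month) pairs with equal keys
--     runs = []
--     for p in pairs:
--         if runs and runs[-1][-1][0] == p[0]:
--             runs[-1].append(p)
--         else:
--             runs.append([p])
--     return runs
--
--
-- def clean_months(seasonality):
--     if len(seasonality) == 12:
--         return 'All year'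
--     keyed = [(_key(pos, month), month) for pos, month in enumerate(seasonality)]
--     ranges = [(run[0][1], run[-1][1]) for run in _runs(keyed)]
--     if ranges[0][0] == 'Jan' and ranges[-1][1] == 'Dec':
--         ranges[0] = (ranges[-1][0], ranges[0][1])
--         ranges.pop()
--     return ', '.join(a if a == b else '{} - {}'.format(a, b) for a, b in ranges)
-- ===== Notes on version B (the rewrite author's own statement) =====
-- stated objective: alternative
-- what changed: B replaces A's break-scan (which tracks a run-start index and asks at every step whether the next month equals nxt(current) via a rebuilt dict + list.index) by computing once per month a normalized key (month_index - position) mod 12 that is constant on each maximal consecutive run (including the Dec->Jan wrap), grouping adjacent equal keys, and emitting (first, last) of each group; …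
-- outside the precondition, e.g. on clean_months(['Oct', 'xx']): A returns 'Oct, xx', B raises ValueError
import Mathlib
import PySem

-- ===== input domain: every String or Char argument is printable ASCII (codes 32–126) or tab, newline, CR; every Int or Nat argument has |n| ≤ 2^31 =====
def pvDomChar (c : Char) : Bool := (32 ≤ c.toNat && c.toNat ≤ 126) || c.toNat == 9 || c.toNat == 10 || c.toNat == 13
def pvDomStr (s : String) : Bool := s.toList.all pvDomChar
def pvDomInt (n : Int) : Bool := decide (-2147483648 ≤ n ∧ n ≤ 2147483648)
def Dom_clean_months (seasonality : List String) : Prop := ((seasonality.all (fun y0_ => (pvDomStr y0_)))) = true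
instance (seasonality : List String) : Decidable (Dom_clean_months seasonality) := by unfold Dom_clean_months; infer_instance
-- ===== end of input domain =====

-- B groups months by the normalized key (index - position) mod 12 instead of A's per-step successor
-- lookup with a tracked run start; objective: alternative decomposition of the same task.

-- ===== PORT A =====
def pvMos : List String := ["Jan", "Feb", "Mar", "Apr", "May", "June", "July", "Aug", "Sept", "Oct", "Nov", "Dec"]

-- mos[(mos.index(month)+1) % len(mos)]; none = ValueError from mos.index (excluded by Pre_)
def nxtA (month : String) : Option String :=
  match PySem.List.index? pvMos month with
  | none => none
  | some i => PySem.List.pyGet? pvMos (PySem.Int.mod ((i : Int) + 1) (pvMos.length : Int))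

def range_strA (rng : String × String) : String :=
  if rng.1 == rng.2 then rng.1 else rng.1 ++ " - " ++ rng.2

-- the body of A's for-loop; state = (ranges, start)
def aStep (s : List String) (acc : List (String × String) × Int) (i : Int) : List (String × String) × Int :=
  if i == (s.length : Int) - 1 || !(some (PySem.List.pyGetD s (i + 1) "") == nxtA (PySem.List.pyGetD s i "")) then
    (acc.1 ++ [(PySem.List.pyGetD s acc.2 "", PySem.List.pyGetD s i "")], i + 1)
  else acc

def clean_months (seasonality : List String) : String :=
  if seasonality.length == 12 then "All year"
  else
    let ranges := ((PySem.List.pyRange 0 (seasonality.length : Int) 1).foldl (aStep seasonality) ([], 0)).1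
    let ranges := if (ranges.headD ("", "")).1 == "Jan" && (ranges.getLastD ("", "")).2 == "Dec" then
        (((ranges.getLastD ("", "")).1, (ranges.headD ("", "")).2) :: ranges.tail).dropLast
      else ranges
    PySem.Str.join ", " (ranges.map range_strA)

-- ===== PORT B =====
-- a run of consecutive months (Dec wrapping to Jan) has one constant key;
-- _MONTHS.index raises ValueError on a non-month (excluded by Pre_): getD 0 is never used inside Pre_
def keyB (pos : Int) (month : String) : Int :=
  PySem.Int.mod ((((PySem.List.index? pvMos month).getD 0 : Nat) : Int) - pos) 12

-- group adjacent (key, month) pairs with equal keys (Source B's _runs loop)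
def runStep (runs : List (List (Int × String))) (p : Int × String) : List (List (Int × String)) :=
  match runs.getLast? with
  | some g => if (g.getLastD (0, "")).1 == p.1 then runs.dropLast ++ [g ++ [p]] else runs ++ [[p]]
  | none => runs ++ [[p]]

def pvRuns (pairs : List (Int × String)) : List (List (Int × String)) :=
  pairs.foldl runStep []

def clean_months_alt (seasonality : List String) : String :=
  if seasonality.length == 12 then "All year"
  else
    let keyed := (PySem.List.enumerate seasonality 0).map (fun pm => (keyB pm.1 pm.2, pm.2))
    let ranges := (pvRuns keyed).map (fun run => ((run.headD (0, "")).2, (run.getLastD (0, "")).2))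
    let ranges := if (ranges.headD ("", "")).1 == "Jan" && (ranges.getLastD ("", "")).2 == "Dec" then
        (((ranges.getLastD ("", "")).1, (ranges.headD ("", "")).2) :: ranges.tail).dropLast
      else ranges
    PySem.Str.join ", " (ranges.map (fun rng => if rng.1 == rng.2 then rng.1 else rng.1 ++ " - " ++ rng.2))

-- ===== PRECONDITION & SPEC =====
-- Pre_ excludes the inputs where Python A raises (the empty list: IndexError on ranges[0]; a
-- non-month name before the last position: ValueError from mos.index inside nxt, unless len == 12
-- short-circuits) and, beyond that, lists whose LAST element is not a month name: A accepts junk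
-- there only by accident of short-circuit evaluation (it raises ValueError on the same junk in any
-- other position), and B's key lookup naturally raises ValueError on it.
def Pre_clean_months (seasonality : List String) : Prop :=
  seasonality ≠ [] ∧ (seasonality.length = 12 ∨ ∀ m ∈ seasonality, m ∈ pvMos)

instance (seasonality : List String) : Decidable (Pre_clean_months seasonality) := by
  unfold Pre_clean_months; infer_instance

def pvWitness_clean_months : List String := ["Jan", "Feb", "July"]

def Spec_clean_months (seasonality : List String) (out : String) : Prop := out = clean_months_alt seasonality
instance (seasonality : List String) (out : String) : Decidable (Spec_clean_months seasonality out) := by unfold Spec_clean_months; infer_instance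

-- ===== CLAIM (what is proved, stated in full; the proofs are below) =====
def Claim_equal_clean_months : Prop := ∀ (seasonality : List String), Dom_clean_months seasonality → Pre_clean_months seasonality → Spec_clean_months seasonality (clean_months seasonality)

-- ===== LEMMAS AND PROOFS =====

-- reference splitting: grpA cur x rest = ranges of the suffix x :: rest, the current run having started at month cur
def grpA (cur : String) (x : String) : List String → List (String × String)
  | [] => [(cur, x)]
  | y :: ys => if some y == nxtA x then grpA cur y ys else (cur, x) :: grpA y y ys

-- last month of the run containing x, and the ranges after that run
def grpW (x : String) : List String → String
  | [] => x
  | y :: ys => if some y == nxtA x then grpW y ys else x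

def grpT (x : String) : List String → List (String × String)
  | [] => []
  | y :: ys => if some y == nxtA x then grpT y ys else grpA y y ys

lemma grpA_eq (t : List String) : ∀ (x c : String), grpA c x t = (c, grpW x t) :: grpT x t := by
  induction t with
  | nil => intro x c; simp [grpA, grpW, grpT]
  | cons y ys ih =>
    intro x c
    by_cases h : some y == nxtA x
    · simp [grpA, grpW, grpT, h, ih y c]
    · simp [grpA, grpW, grpT, h]

lemma key_step (p : Int) (m m' : String) (hm : m ∈ pvMos) (hm' : m' ∈ pvMos) :
    (keyB p m == keyB (p + 1) m') = (some m' == nxtA m) := by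
  have hnd : pvMos.Nodup := by decide
  have hlen : pvMos.length = 12 := rfl
  rw [Bool.eq_iff_iff, beq_iff_eq, beq_iff_eq]
  unfold keyB nxtA
  cases hmi : PySem.List.index? pvMos m with
  | none => exact absurd hm (by simpa using (PySem.List.index?_eq_none_iff pvMos m).mp hmi)
  | some i =>
    cases hmi' : PySem.List.index? pvMos m' with
    | none => exact absurd hm' (by simpa using (PySem.List.index?_eq_none_iff pvMos m').mp hmi')
    | some i' =>
      obtain ⟨hk, hgi, -⟩ := PySem.List.getElem_of_index?_eq_some hmi
      obtain ⟨hk', hgi', -⟩ := PySem.List.getElem_of_index?_eq_some hmi'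
      have hlen' : ((pvMos.length : Nat) : Int) = 12 := by norm_num [hlen]
      simp only [Option.getD_some, hlen']
      have hj0 : 0 ≤ PySem.Int.mod ((i : Int) + 1) 12 := PySem.Int.mod_nonneg _ (by norm_num)
      have hj12 : PySem.Int.mod ((i : Int) + 1) 12 < 12 := PySem.Int.mod_lt _ (by norm_num)
      have hje : PySem.Int.mod ((i : Int) + 1) 12 = ((i : Int) + 1) % 12 :=
        PySem.Int.mod_eq_emod_of_pos (by norm_num)
      rw [PySem.List.pyGet?_of_nonneg pvMos hj0]
      have hjn : (PySem.Int.mod ((i : Int) + 1) 12).toNat < pvMos.length := by omega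
      rw [List.getElem?_eq_getElem hjn]
      simp only [Option.some.injEq]
      rw [PySem.Int.mod_eq_emod_of_pos (by norm_num : (0:Int) < 12),
        PySem.Int.mod_eq_emod_of_pos (by norm_num : (0:Int) < 12)]
      have hrhs : m' = pvMos[(PySem.Int.mod ((i : Int) + 1) 12).toNat] ↔
          i' = (PySem.Int.mod ((i : Int) + 1) 12).toNat := by
        rw [← hgi', List.Nodup.getElem_inj_iff hnd]
      rw [hrhs]
      rw [hlen] at hk hk'
      constructor
      · intro h; omega
      · intro h; omega

-- ----- A-side characterisation -----
lemma getD_append (pre : List String) (z : String) (suf : List String) (k : Nat) :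
    PySem.List.pyGetD (pre ++ z :: suf) ((pre.length + k : Nat) : Int) "" = (z :: suf).getD k "" := by
  rw [PySem.List.pyGetD_natCast]
  simp [List.getD_eq_getElem?_getD, List.getElem?_append_right]

lemma foldA_eq (s : List String) (rest : List String) : ∀ (x : String) (pre : List String)
    (acc : List (String × String)) (st : Int), s = pre ++ x :: rest → 0 ≤ st → st ≤ pre.length →
    ((PySem.List.pyRange (pre.length : Int) (s.length : Int) 1).foldl (aStep s) (acc, st)).1
      = acc ++ grpA (PySem.List.pyGetD s st "") x rest := by
  induction rest with
  | nil =>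
    intro x pre acc st hs hst0 hst
    subst hs
    have hlen : (((pre ++ [x]).length : Nat) : Int) = (pre.length : Int) + 1 := by simp
    rw [hlen, PySem.List.pyRange_one_singleton]
    have hgx : PySem.List.pyGetD (pre ++ [x]) ((pre.length : Nat) : Int) "" = x := by
      simp
    have hcond : (((pre.length : Nat) : Int) == (((pre ++ [x]).length : Nat) : Int) - 1) = true := by
      simp
    simp only [List.foldl_cons, List.foldl_nil, aStep, hcond, Bool.true_or, if_true]
    simp [grpA, hgx]
  | cons y ys ih =>
    intro x pre acc st hs hst0 hst
    have hxg : PySem.List.pyGetD s ((pre.length : Nat) : Int) "" = x := by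
      rw [hs]; simp
    have hyg : PySem.List.pyGetD s (((pre.length : Nat) : Int) + 1) "" = y := by
      rw [hs]
      have : ((pre.length : Nat) : Int) + 1 = ((pre.length + 1 : Nat) : Int) := by omega
      rw [this]; simpa using getD_append pre x (y :: ys) 1
    have hlt : ((pre.length : Nat) : Int) < ((s.length : Nat) : Int) := by
      rw [hs]; simp; omega
    have hcond : (((pre.length : Nat) : Int) == ((s.length : Nat) : Int) - 1) = false := by
      rw [hs]; simp; omega
    rw [PySem.List.pyRange_one_cons hlt, List.foldl_cons]
    have hs' : s = (pre ++ [x]) ++ y :: ys := by rw [hs]; simp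
    have hpre' : ((pre.length : Nat) : Int) + 1 = (((pre ++ [x]).length : Nat) : Int) := by
      simp
    cases hxy : (some y == nxtA x) with
    | true =>
      have : aStep s (acc, st) ((pre.length : Nat) : Int) = (acc, st) := by
        simp only [aStep, hcond, hyg, hxg, hxy, Bool.not_true, Bool.or_false,
          if_false, Bool.false_eq_true]
      rw [this, hpre']
      rw [ih y (pre ++ [x]) acc st hs' hst0 (by simpa using le_trans hst (by simp))]
      simp [grpA, hxy]
    | false =>
      have : aStep s (acc, st) ((pre.length : Nat) : Int)
          = (acc ++ [(PySem.List.pyGetD s st "", x)], ((pre.length : Nat) : Int) + 1) := by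
        simp only [aStep, hcond, hyg, hxg, hxy, Bool.not_false, Bool.or_true,
          if_true]
      rw [this, hpre']
      rw [ih y (pre ++ [x]) (acc ++ [(PySem.List.pyGetD s st "", x)])
        (((pre ++ [x]).length : Nat) : Int) hs' (by positivity) le_rfl]
      rw [← hpre', hyg]
      simp [grpA, hxy]

lemma rangesA_eq (x : String) (t : List String) :
    ((PySem.List.pyRange 0 (((x :: t).length : Nat) : Int) 1).foldl (aStep (x :: t)) ([], 0)).1
      = grpA x x t := by
  have h := foldA_eq (x :: t) t x [] [] 0 (by simp) le_rfl (by simp)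
  simpa [PySem.List.pyGetD_zero_cons] using h

-- ----- B-side characterisation -----
def buildR (g : List (Int × String)) : List (Int × String) → List (List (Int × String))
  | [] => [g]
  | p :: ps => if (g.getLastD (0, "")).1 == p.1 then buildR (g ++ [p]) ps else g :: buildR [p] ps

lemma headD_append_left {α : Type} (l l' : List α) (d : α) (h : l ≠ []) :
    (l ++ l').headD d = l.headD d := by
  cases l with
  | nil => exact absurd rfl h
  | cons a t => simp

lemma buildR_cons_true (g : List (Int × String)) (p : Int × String) (ps : List (Int × String))
    (h : ((g.getLastD (0, "")).1 == p.1) = true) :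
    buildR g (p :: ps) = buildR (g ++ [p]) ps := by
  rw [buildR, h, if_pos rfl]

lemma buildR_cons_false (g : List (Int × String)) (p : Int × String) (ps : List (Int × String))
    (h : ((g.getLastD (0, "")).1 == p.1) = false) :
    buildR g (p :: ps) = g :: buildR [p] ps := by
  rw [buildR, h]
  simp

lemma foldl_runStep_eq (ps : List (Int × String)) : ∀ (gs : List (List (Int × String)))
    (g : List (Int × String)),
    ps.foldl runStep (gs ++ [g]) = gs ++ buildR g ps := by
  induction ps with
  | nil => intro gs g; simp [buildR]
  | cons p ps ih =>
    intro gs g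
    rw [List.foldl_cons]
    have hstep : runStep (gs ++ [g]) p
        = if (g.getLastD (0, "")).1 == p.1 then gs ++ [g ++ [p]] else (gs ++ [g]) ++ [[p]] := by
      simp [runStep]
    cases h : ((g.getLastD (0, "")).1 == p.1) with
    | true =>
      rw [hstep, if_pos h, ih gs (g ++ [p]), buildR_cons_true g p ps h]
    | false =>
      rw [hstep, if_neg (by rw [h]; simp), ih (gs ++ [g]) [p], buildR_cons_false g p ps h]
      simp

lemma buildR_eq : ∀ (t : List String) (z : String) (p : Int), z ∈ pvMos → (∀ m ∈ t, m ∈ pvMos) →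
    ∀ (r : List (Int × String)),
    (buildR (r ++ [(keyB p z, z)])
        ((PySem.List.enumerate t (p + 1)).map (fun pm => (keyB pm.1 pm.2, pm.2)))).map
      (fun run => ((run.headD (0, "")).2, (run.getLastD (0, "")).2))
      = (((r ++ [(keyB p z, z)]).headD (0, "")).2, grpW z t) :: grpT z t := by
  intro t
  induction t with
  | nil =>
    intro z p _hz _hv r
    simp [buildR, grpW, grpT, PySem.List.enumerate_nil]
  | cons y ys ih =>
    intro z p hz hv r
    have hy : y ∈ pvMos := hv y (by simp)
    have hys : ∀ m ∈ ys, m ∈ pvMos := fun m hm => hv m (by simp [hm])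
    rw [PySem.List.enumerate_cons, List.map_cons]
    have hlast : ((r ++ [(keyB p z, z)]).getLastD (0, "")).1 = keyB p z := by
      rw [List.getLastD_concat]
    have hcond : (((r ++ [(keyB p z, z)]).getLastD (0, "")).1 == (keyB (p + 1) y, y).1)
        = (some y == nxtA z) := by
      rw [hlast]; exact key_step p z y hz hy
    cases hxy : (some y == nxtA z) with
    | true =>
      have hb : buildR (r ++ [(keyB p z, z)])
          ((keyB (p + 1) y, y) :: (PySem.List.enumerate ys (p + 1 + 1)).map (fun pm => (keyB pm.1 pm.2, pm.2)))
          = buildR ((r ++ [(keyB p z, z)]) ++ [(keyB (p + 1) y, y)])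
              ((PySem.List.enumerate ys (p + 1 + 1)).map (fun pm => (keyB pm.1 pm.2, pm.2))) := by
        exact buildR_cons_true _ _ _ (by rw [hcond, hxy])
      rw [hb, ih y (p + 1) hy hys (r ++ [(keyB p z, z)])]
      rw [headD_append_left _ _ _ (by simp)]
      simp [grpW, grpT, hxy]
    | false =>
      have hb : buildR (r ++ [(keyB p z, z)])
          ((keyB (p + 1) y, y) :: (PySem.List.enumerate ys (p + 1 + 1)).map (fun pm => (keyB pm.1 pm.2, pm.2)))
          = (r ++ [(keyB p z, z)]) :: buildR [(keyB (p + 1) y, y)]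
              ((PySem.List.enumerate ys (p + 1 + 1)).map (fun pm => (keyB pm.1 pm.2, pm.2))) := by
        exact buildR_cons_false _ _ _ (by rw [hcond, hxy])
      rw [hb, List.map_cons]
      have := ih y (p + 1) hy hys []
      simp only [List.nil_append] at this
      rw [this]
      simp [grpW, grpT, hxy, grpA_eq]

lemma rangesB_eq (x : String) (t : List String) (hx : x ∈ pvMos) (ht : ∀ m ∈ t, m ∈ pvMos) :
    (pvRuns ((PySem.List.enumerate (x :: t) 0).map (fun pm => (keyB pm.1 pm.2, pm.2)))).map
      (fun run => ((run.headD (0, "")).2, (run.getLastD (0, "")).2)) = grpA x x t := by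
  rw [PySem.List.enumerate_cons, List.map_cons]
  unfold pvRuns
  rw [List.foldl_cons]
  have h1 : runStep [] (keyB 0 x, x) = [] ++ [[(keyB 0 x, x)]] := by
    simp [runStep]
  rw [h1, foldl_runStep_eq]
  have h2 := buildR_eq t x 0 hx ht []
  simp only [List.nil_append] at h2
  simp only [show ((0 : Int) + 1) = 1 from rfl] at h2 ⊢
  simp only [List.nil_append]
  rw [h2, grpA_eq]
  simp

-- ===== VERDICT (by name: the statement is the Claim_ definition above) =====
theorem clean_months_spec : Claim_equal_clean_months := by
  intro s _hdom hpre
  unfold Spec_clean_months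
  obtain ⟨x, t, rfl⟩ : ∃ x t, s = x :: t := by
    cases s with
    | nil => exact absurd rfl hpre.1
    | cons x t => exact ⟨x, t, rfl⟩
  unfold clean_months clean_months_alt
  by_cases h12 : ((x :: t).length == 12) = true
  · simp only [h12, if_true]
  · have hv : ∀ m ∈ x :: t, m ∈ pvMos := by
      rcases hpre.2 with h | h
      · exact absurd h (by simpa using h12)
      · exact h
    simp only [h12, if_false, Bool.false_eq_true]
    rw [rangesA_eq, rangesB_eq x t (hv x (by simp)) (fun m hm => hv m (by simp [hm]))]
    rfl
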